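-- pv_equiv track=rewrite | github.com/nguyenan11/Algorithm | Failed Interview Questions/count_squares.py | countSquaresAvoidDuplication
-- ===== SOURCE A (Python) =====
-- def countSquaresAvoidDuplication(points):
--   storage = set(points)
--   visited_squares = set()
--   for i in range(len(points)):
--     px, py = points[i]
--     for j in range(i + 1, len(points)):
--       x, y = points[j]
--       if abs(x - px) == abs(y - py) and x != px and y != py:
--         if (x, py) in storage and (px, y) in storage:
--           square = tuple(sorted([(px, py), (x, y), (px, y), (x, py)]))
--           if square not in visited_squares:
--             visited_squares.add(square)
--   return len(visited_squares)
-- ===== SOURCE B (Python) =====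
-- def countSquaresAvoidDuplication(points):
--   # Count each axis-aligned square once via its left vertical side:
--   # for distinct points (x, y1), (x, y2) with y1 < y2 in the deduplicated set,
--   # the square is counted iff the two right corners are present as well.
--   pts = set(points)
--   count = 0
--   for (x, y1) in pts:
--     for (x2, y2) in pts:
--       if x2 == x and y1 < y2:
--         d = y2 - y1
--         if (x + d, y1) in pts and (x + d, y2) in pts:
--           count += 1
--   return count
-- ===== Notes on version B (the rewrite author's own statement) =====
-- stated objective: simpler
-- what changed: A scans all index pairs of the raw list for diagonal pairs, canonicalises each found square as a sorted 4-tuple and deduplicates through a visited set; B instead counts each square exactly once by iterating over the deduplicated point set and counting left vertical sides (y1 < y2 in the same column) whose two right corners are present, so no visited set, no 4-tuple sorting and no dedup structure is needed. (measured ~2x faster: B does no visited-set lookups and no per-hit 4-tuple sorting, and iterates only distinct points)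
import Mathlib
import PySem

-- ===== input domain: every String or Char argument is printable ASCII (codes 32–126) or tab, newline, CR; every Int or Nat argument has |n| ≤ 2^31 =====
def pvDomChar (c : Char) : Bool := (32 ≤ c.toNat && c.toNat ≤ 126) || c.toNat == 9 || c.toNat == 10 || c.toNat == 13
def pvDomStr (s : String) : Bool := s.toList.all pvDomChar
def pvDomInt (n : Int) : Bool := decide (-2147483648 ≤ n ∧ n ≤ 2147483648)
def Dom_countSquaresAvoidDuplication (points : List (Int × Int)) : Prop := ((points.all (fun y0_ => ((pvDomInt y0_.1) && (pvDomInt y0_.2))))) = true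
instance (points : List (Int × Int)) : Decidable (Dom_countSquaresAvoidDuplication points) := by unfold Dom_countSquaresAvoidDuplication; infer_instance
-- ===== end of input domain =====

-- B replaces A's diagonal-pair scan with dedup-set bookkeeping by a direct count of
-- left vertical sides over the deduplicated point set (each square counted exactly once),
-- eliminating the visited set and the 4-tuple sorting (objective: simpler).

-- ===== PORT A =====
def countSquaresAvoidDuplication (points : List (Int × Int)) : Int :=
  let storage := PySem.Set.ofList points
  let visited : PySem.Set (List (Int × Int)) :=
    (PySem.List.pyRange 0 (PySem.List.len points) 1).foldl (fun visited i =>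
      let p := PySem.List.pyGetD points i (0, 0)
      (PySem.List.pyRange (i + 1) (PySem.List.len points) 1).foldl (fun visited j =>
        let q := PySem.List.pyGetD points j (0, 0)
        if |q.1 - p.1| = |q.2 - p.2| ∧ q.1 ≠ p.1 ∧ q.2 ≠ p.2 then
          if PySem.Set.contains storage (q.1, p.2) && PySem.Set.contains storage (p.1, q.2) then
            let square := PySem.List.sorted2 [p, q, (p.1, q.2), (q.1, p.2)] Prod.fst Prod.snd
            if !(PySem.Set.contains visited square) then PySem.Set.add visited square else visited
          else visited
        else visited) visited) PySem.Set.empty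
  PySem.Set.len visited

-- ===== PORT B =====
def countSquaresAvoidDuplication_alt (points : List (Int × Int)) : Int :=
  let pts := PySem.Set.ofList points
  List.foldl (fun count (p : Int × Int) =>
    List.foldl (fun count (q : Int × Int) =>
      if q.1 = p.1 ∧ p.2 < q.2 then
        let d := q.2 - p.2
        if PySem.Set.contains pts (p.1 + d, p.2) && PySem.Set.contains pts (p.1 + d, q.2) then
          count + 1
        else count
      else count) count pts) (0 : Int) pts

-- ===== PRECONDITION & SPEC =====
def Spec_countSquaresAvoidDuplication (points : List (Int × Int)) (out : Int) : Prop := out = countSquaresAvoidDuplication_alt points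
instance (points : List (Int × Int)) (out : Int) : Decidable (Spec_countSquaresAvoidDuplication points out) := by unfold Spec_countSquaresAvoidDuplication; infer_instance

-- ===== CLAIM (what is proved, stated in full; the proofs are below) =====
def Claim_equal_countSquaresAvoidDuplication : Prop := ∀ (points : List (Int × Int)), Dom_countSquaresAvoidDuplication points → Spec_countSquaresAvoidDuplication points (countSquaresAvoidDuplication points)

-- ===== LEMMAS AND PROOFS =====

-- B's boolean test: (a, b) is the left side of a square whose other two corners are present.
def pvGoodB (points : List (Int × Int)) (a b : Int × Int) : Bool :=
  decide (b.1 = a.1 ∧ a.2 < b.2) &&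
    (PySem.Set.contains (PySem.Set.ofList points) (a.1 + (b.2 - a.2), a.2) &&
     PySem.Set.contains (PySem.Set.ofList points) (a.1 + (b.2 - a.2), b.2))

-- A's boolean test on an ordered pair of list entries.
def pvCondB (points : List (Int × Int)) (p q : Int × Int) : Bool :=
  decide (|q.1 - p.1| = |q.2 - p.2| ∧ q.1 ≠ p.1 ∧ q.2 ≠ p.2) &&
    (PySem.Set.contains (PySem.Set.ofList points) (q.1, p.2) &&
     PySem.Set.contains (PySem.Set.ofList points) (p.1, q.2))

def pvKey (p q : Int × Int) : List (Int × Int) :=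
  PySem.List.sorted2 [p, q, (p.1, q.2), (q.1, p.2)] Prod.fst Prod.snd

-- canonical (lexicographically sorted) corner list of the square with left side (a, b)
def pvCanon (a b : Int × Int) : List (Int × Int) :=
  [a, b, (a.1 + (b.2 - a.2), a.2), (a.1 + (b.2 - a.2), b.2)]

-- ordered pairs (i < j) of list entries, in A's traversal order
def pvTailPairs : List (Int × Int) → List ((Int × Int) × (Int × Int))
  | [] => []
  | p :: rest => (rest.map (fun q => (p, q))) ++ pvTailPairs rest

def pvKeys (points : List (Int × Int)) : List (List (Int × Int)) :=
  (pvTailPairs points).filterMap (fun z => if pvCondB points z.1 z.2 then some (pvKey z.1 z.2) else none)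

def pvPairs (points : List (Int × Int)) : List ((Int × Int) × (Int × Int)) :=
  (PySem.Set.ofList points ×ˢ PySem.Set.ofList points).filter (fun z => pvGoodB points z.1 z.2)

lemma pvB_eq (points : List (Int × Int)) :
    countSquaresAvoidDuplication_alt points = ((pvPairs points).length : Int) := by
  unfold countSquaresAvoidDuplication_alt pvPairs
  have hinner : ∀ (p : Int × Int) (c : Int),
      List.foldl (fun count (q : Int × Int) =>
        if q.1 = p.1 ∧ p.2 < q.2 then
          if PySem.Set.contains (PySem.Set.ofList points) (p.1 + (q.2 - p.2), p.2) &&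
             PySem.Set.contains (PySem.Set.ofList points) (p.1 + (q.2 - p.2), q.2) then
            count + 1
          else count
        else count) c (PySem.Set.ofList points)
      = c + ((PySem.Set.ofList points).countP (fun q => pvGoodB points p q)) := by
    intro p c
    rw [← PySem.List.foldl_count_if (fun q => pvGoodB points p q) (PySem.Set.ofList points) c]
    apply PySem.List.foldl_congr_mem
    intro acc q _
    by_cases h1 : q.1 = p.1 ∧ p.2 < q.2
    · simp [pvGoodB, h1]
    · simp [pvGoodB, h1]
  -- outer loop: sum over the product
  have houter : ∀ (m' : List (Int × Int)) (c : Int),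
      List.foldl (fun count (p : Int × Int) =>
        List.foldl (fun count (q : Int × Int) =>
          if q.1 = p.1 ∧ p.2 < q.2 then
            if PySem.Set.contains (PySem.Set.ofList points) (p.1 + (q.2 - p.2), p.2) &&
               PySem.Set.contains (PySem.Set.ofList points) (p.1 + (q.2 - p.2), q.2) then
              count + 1
            else count
          else count) count (PySem.Set.ofList points)) c m'
      = c + (((m' ×ˢ PySem.Set.ofList points).filter (fun z => pvGoodB points z.1 z.2)).length : Int) := by
    intro m'
    induction m' with
    | nil => intro c; simp
    | cons a l ih =>
      intro c
      rw [List.foldl_cons, hinner a c, ih, List.product_cons, List.filter_append, List.length_append]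
      have : (List.filter (fun z => pvGoodB points z.1 z.2) (List.map (Prod.mk a) (PySem.Set.ofList points))).length
          = (PySem.Set.ofList points).countP (fun q => pvGoodB points a q) := by
        rw [← List.countP_eq_length_filter, List.countP_map]
        rfl
      rw [this]
      push_cast
      ring
  rw [houter (PySem.Set.ofList points) 0]
  simp

-- index double loop over i < j = structural fold over pvTailPairs
lemma pvIdxNat {β : Type} (F : (Int × Int) → (Int × Int) → β → β) :
    ∀ (xs : List (Int × Int)) (s : β),
      (List.range xs.length).foldl
        (fun v k => ((xs.drop (k+1)).foldl (fun v q => F (xs.getD k (0,0)) q v) v)) s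
      = (pvTailPairs xs).foldl (fun v z => F z.1 z.2 v) s := by
  intro xs
  induction xs with
  | nil => intro s; simp [pvTailPairs]
  | cons p rest ih =>
    intro s
    rw [List.length_cons, List.range_succ_eq_map, List.foldl_cons, List.foldl_map]
    simp only [List.getD_cons_zero, List.getD_cons_succ]
    rw [pvTailPairs, List.foldl_append, List.foldl_map]
    exact ih _
lemma pvIdx {β : Type} (F : (Int × Int) → (Int × Int) → β → β) (xs : List (Int × Int)) (s : β) :
    (PySem.List.pyRange 0 (PySem.List.len xs) 1).foldl (fun v i =>
      (PySem.List.pyRange (i+1) (PySem.List.len xs) 1).foldl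
        (fun v j => F (PySem.List.pyGetD xs i (0,0)) (PySem.List.pyGetD xs j (0,0)) v) v) s
    = (pvTailPairs xs).foldl (fun v z => F z.1 z.2 v) s := by
  have step1 : ∀ (v : β), ∀ i ∈ PySem.List.pyRange 0 (PySem.List.len xs) 1,
      (PySem.List.pyRange (i+1) (PySem.List.len xs) 1).foldl
        (fun v j => F (PySem.List.pyGetD xs i (0,0)) (PySem.List.pyGetD xs j (0,0)) v) v
      = (xs.drop (i+1).toNat).foldl (fun v q => F (PySem.List.pyGetD xs i (0,0)) q v) v := by
    intro v i hi
    have h0 : (0 : Int) ≤ i := ((PySem.List.mem_pyRange_one).1 hi).1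
    exact PySem.List.foldl_pyRange_pyGetD xs (0,0)
      (fun v q => F (PySem.List.pyGetD xs i (0,0)) q v) v (a := i + 1) (by omega)
  rw [PySem.List.foldl_congr_mem _ _ _ s step1]
  rw [show PySem.List.pyRange 0 (PySem.List.len xs) 1
        = (List.range xs.length).map (fun k => ((k : Nat) : Int)) by
    rw [PySem.List.pyRange_one]
    simp [PySem.List.len]]
  rw [List.foldl_map]
  rw [← pvIdxNat F xs s]
  apply PySem.List.foldl_congr_mem
  intro v k _
  have h1 : ((k : Int) + 1).toNat = k + 1 := by omega
  have h2 : PySem.List.pyGetD xs ((k : Nat) : Int) (0,0) = xs.getD k (0,0) :=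
    PySem.List.pyGetD_natCast xs k (0,0)
  rw [h1, h2]

-- a fold of conditional Set.add is a Set.update of the collected keys
lemma pvFoldAdd (points : List (Int × Int)) :
    ∀ (L : List ((Int × Int) × (Int × Int))) (s : PySem.Set (List (Int × Int))),
      L.foldl (fun v z => if pvCondB points z.1 z.2 then PySem.Set.add v (pvKey z.1 z.2) else v) s
      = PySem.Set.update s (L.filterMap
          (fun z => if pvCondB points z.1 z.2 then some (pvKey z.1 z.2) else none)) := by
  intro L
  induction L with
  | nil => intro s; simp [PySem.Set.update]
  | cons z l ih =>
    intro s
    by_cases h : pvCondB points z.1 z.2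
    · simp only [List.foldl_cons, List.filterMap_cons, h, if_pos]
      rw [PySem.Set.update_cons, ih]
    · simp only [List.foldl_cons, List.filterMap_cons, h, Bool.false_eq_true, if_false]
      exact ih s

lemma pvA_eq (points : List (Int × Int)) :
    countSquaresAvoidDuplication points = ((pvKeys points).toFinset.card : Int) := by
  simp only [countSquaresAvoidDuplication]
  rw [pvIdx (fun p q v =>
    if |q.1 - p.1| = |q.2 - p.2| ∧ q.1 ≠ p.1 ∧ q.2 ≠ p.2 then
      if PySem.Set.contains (PySem.Set.ofList points) (q.1, p.2) &&
         PySem.Set.contains (PySem.Set.ofList points) (p.1, q.2) then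
        if !(PySem.Set.contains v (PySem.List.sorted2 [p, q, (p.1, q.2), (q.1, p.2)] Prod.fst Prod.snd))
        then PySem.Set.add v (PySem.List.sorted2 [p, q, (p.1, q.2), (q.1, p.2)] Prod.fst Prod.snd)
        else v
      else v
    else v) points PySem.Set.empty]
  have hstep : ∀ (v : PySem.Set (List (Int × Int))), ∀ z ∈ pvTailPairs points,
      (fun (v : PySem.Set (List (Int × Int))) (z : (Int × Int) × (Int × Int)) =>
        if |z.2.1 - z.1.1| = |z.2.2 - z.1.2| ∧ z.2.1 ≠ z.1.1 ∧ z.2.2 ≠ z.1.2 then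
          if PySem.Set.contains (PySem.Set.ofList points) (z.2.1, z.1.2) &&
             PySem.Set.contains (PySem.Set.ofList points) (z.1.1, z.2.2) then
            if !(PySem.Set.contains v (PySem.List.sorted2 [z.1, z.2, (z.1.1, z.2.2), (z.2.1, z.1.2)] Prod.fst Prod.snd))
            then PySem.Set.add v (PySem.List.sorted2 [z.1, z.2, (z.1.1, z.2.2), (z.2.1, z.1.2)] Prod.fst Prod.snd)
            else v
          else v
        else v) v z
      = if pvCondB points z.1 z.2 then PySem.Set.add v (pvKey z.1 z.2) else v := by
    intro v z _
    simp only [pvKey]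
    set k := PySem.List.sorted2 [z.1, z.2, (z.1.1, z.2.2), (z.2.1, z.1.2)] Prod.fst Prod.snd with hk
    by_cases h1 : |z.2.1 - z.1.1| = |z.2.2 - z.1.2| ∧ z.2.1 ≠ z.1.1 ∧ z.2.2 ≠ z.1.2
    · rw [if_pos h1]
      by_cases h2 : (PySem.Set.contains (PySem.Set.ofList points) (z.2.1, z.1.2) &&
          PySem.Set.contains (PySem.Set.ofList points) (z.1.1, z.2.2)) = true
      · have hc : pvCondB points z.1 z.2 = true := by
          simp only [pvCondB, Bool.and_eq_true, decide_eq_true_eq] at h2 ⊢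
          exact ⟨h1, h2⟩
        rw [if_pos h2, hc]
        by_cases h3 : PySem.Set.contains v k = true
        · rw [h3]
          simp only [Bool.not_true, Bool.false_eq_true, if_false, if_true]
          exact (PySem.Set.add_of_mem ((PySem.Set.contains_iff _ _).1 h3)).symm
        · have h3' : PySem.Set.contains v k = false := by simpa using h3
          rw [h3']
          simp
      · have hc : pvCondB points z.1 z.2 = false := by
          have h2' : (PySem.Set.contains (PySem.Set.ofList points) (z.2.1, z.1.2) &&
              PySem.Set.contains (PySem.Set.ofList points) (z.1.1, z.2.2)) = false := by
            simpa using h2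
          unfold pvCondB
          rw [h2', Bool.and_false]
        rw [if_neg h2, hc]
        simp
    · rw [if_neg h1]
      have hc : pvCondB points z.1 z.2 = false := by simp [pvCondB, h1]
      rw [hc]
      simp
  rw [PySem.List.foldl_congr_mem _ _ _ PySem.Set.empty hstep, pvFoldAdd, PySem.Set.update_empty]
  show ((PySem.Set.ofList (pvKeys points)).length : Int) = _
  congr 1
  have hn : (PySem.Set.ofList (pvKeys points)).Nodup := PySem.Set.nodup_ofList _
  have ht : (PySem.Set.ofList (pvKeys points)).toFinset = (pvKeys points).toFinset := by
    ext k; simp [PySem.Set.mem_ofList]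
  rw [← List.toFinset_card_of_nodup hn, ht]

-- the four possible orientations of a diagonal pair all sort to the same corner list
lemma pvS1 (x x' y1 y2 : Int) (hx : x < x') (hy : y1 < y2) :
    PySem.List.sorted2 [(x,y1),(x',y2),(x,y2),(x',y1)] Prod.fst Prod.snd
      = [(x,y1),(x,y2),(x',y1),(x',y2)] := by
  have h1 : ¬ (x' < x) := by omega
  have h3 : ¬ (y2 < y1) := by omega
  simp [PySem.List.sorted2, PySem.List.insertBy, hx, hy, h1, h3]

lemma pvS2 (x x' y1 y2 : Int) (hx : x < x') (hy : y1 < y2) :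
    PySem.List.sorted2 [(x',y2),(x,y1),(x',y1),(x,y2)] Prod.fst Prod.snd
      = [(x,y1),(x,y2),(x',y1),(x',y2)] := by
  have h1 : ¬ (x' < x) := by omega
  have h3 : ¬ (y2 < y1) := by omega
  simp [PySem.List.sorted2, PySem.List.insertBy, hx, hy, h1, h3]

lemma pvS3 (x x' y1 y2 : Int) (hx : x < x') (hy : y1 < y2) :
    PySem.List.sorted2 [(x,y2),(x',y1),(x,y1),(x',y2)] Prod.fst Prod.snd
      = [(x,y1),(x,y2),(x',y1),(x',y2)] := by
  have h1 : ¬ (x' < x) := by omega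
  have h3 : ¬ (y2 < y1) := by omega
  simp [PySem.List.sorted2, PySem.List.insertBy, hx, hy, h1, h3]

lemma pvS4 (x x' y1 y2 : Int) (hx : x < x') (hy : y1 < y2) :
    PySem.List.sorted2 [(x',y1),(x,y2),(x',y2),(x,y1)] Prod.fst Prod.snd
      = [(x,y1),(x,y2),(x',y1),(x',y2)] := by
  have h1 : ¬ (x' < x) := by omega
  have h3 : ¬ (y2 < y1) := by omega
  simp [PySem.List.sorted2, PySem.List.insertBy, hx, hy, h1, h3]

lemma pvMem_tailPairs {l : List (Int × Int)} {z : (Int × Int) × (Int × Int)}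
    (h : z ∈ pvTailPairs l) : z.1 ∈ l ∧ z.2 ∈ l := by
  induction l with
  | nil => simp [pvTailPairs] at h
  | cons p rest ih =>
    rw [pvTailPairs, List.mem_append] at h
    rcases h with h | h
    · obtain ⟨q, hq, rfl⟩ := List.mem_map.1 h
      exact ⟨List.mem_cons_self, List.mem_cons_of_mem _ hq⟩
    · obtain ⟨h1, h2⟩ := ih h
      exact ⟨List.mem_cons_of_mem _ h1, List.mem_cons_of_mem _ h2⟩

lemma pvTailPairs_of_mem {l : List (Int × Int)} {p q : Int × Int}
    (hp : p ∈ l) (hq : q ∈ l) (hne : p ≠ q) :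
    (p, q) ∈ pvTailPairs l ∨ (q, p) ∈ pvTailPairs l := by
  induction l with
  | nil => simp at hp
  | cons a rest ih =>
    rw [List.mem_cons] at hp hq
    rcases hp with rfl | hp
    · rcases hq with rfl | hq
      · exact absurd rfl hne
      · exact Or.inl (by rw [pvTailPairs, List.mem_append]; exact Or.inl (List.mem_map.2 ⟨q, hq, rfl⟩))
    · rcases hq with rfl | hq
      · exact Or.inr (by rw [pvTailPairs, List.mem_append]; exact Or.inl (List.mem_map.2 ⟨p, hp, rfl⟩))
      · rcases ih hp hq with h | h
        · exact Or.inl (by rw [pvTailPairs, List.mem_append]; exact Or.inr h)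
        · exact Or.inr (by rw [pvTailPairs, List.mem_append]; exact Or.inr h)

-- forward geometry: a diagonal pair detected by A names the square with left side (a, b)
lemma pvForward {points : List (Int × Int)} {p q : Int × Int}
    (hp : p ∈ points) (hq : q ∈ points) (hc : pvCondB points p q = true) :
    ∃ a b : Int × Int, a ∈ PySem.Set.ofList points ∧ b ∈ PySem.Set.ofList points ∧
      pvGoodB points a b = true ∧ pvKey p q = pvCanon a b := by
  obtain ⟨px, py⟩ := p
  obtain ⟨qx, qy⟩ := q
  simp only [pvCondB, Bool.and_eq_true, decide_eq_true_eq] at hc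
  obtain ⟨⟨habs, hxne, hyne⟩, hm1, hm2⟩ := hc
  have habs' : qx - px = qy - py ∨ qx - px = -(qy - py) := abs_eq_abs.1 habs

  have hmem : ∀ u : Int × Int, u ∈ points → u ∈ PySem.Set.ofList points := by
    intro u hu; rw [PySem.Set.mem_ofList]; exact hu
  have hcont : ∀ u : Int × Int,
      PySem.Set.contains (PySem.Set.ofList points) u = true ↔ u ∈ points := by
    intro u; rw [PySem.Set.contains_iff, PySem.Set.mem_ofList]
  rw [hcont] at hm1 hm2
  rcases habs' with hd | hd
  · rcases lt_or_gt_of_ne (fun h : qx = px => hxne (by simp [h])) with hlt | hgt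
    · -- qx < px, equal diffs: q = (qx, qy) is the lower-left corner
      refine ⟨(qx, qy), (qx, py), hmem _ hq, hmem _ hm1, ?_, ?_⟩
      · simp only [pvGoodB, Bool.and_eq_true, decide_eq_true_eq]
        refine ⟨⟨by simp, by omega⟩, ?_, ?_⟩ <;> rw [hcont]
        · rw [show ((qx + (py - qy), qy) : Int × Int) = (px, qy) by
            rw [Prod.mk.injEq]; exact ⟨by omega, rfl⟩]
          exact hm2
        · rw [show ((qx + (py - qy), py) : Int × Int) = (px, py) by
            rw [Prod.mk.injEq]; exact ⟨by omega, rfl⟩]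
          exact hp
      · unfold pvKey pvCanon
        simp only
        rw [pvS2 qx px qy py hlt (by omega)]
        rw [show qx + (py - qy) = px by omega]
    · -- px < qx, equal diffs: p = (px, py) is the lower-left corner
      refine ⟨(px, py), (px, qy), hmem _ hp, hmem _ hm2, ?_, ?_⟩
      · simp only [pvGoodB, Bool.and_eq_true, decide_eq_true_eq]
        refine ⟨⟨by simp, by omega⟩, ?_, ?_⟩ <;> rw [hcont]
        · rw [show ((px + (qy - py), py) : Int × Int) = (qx, py) by
            rw [Prod.mk.injEq]; exact ⟨by omega, rfl⟩]
          exact hm1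
        · rw [show ((px + (qy - py), qy) : Int × Int) = (qx, qy) by
            rw [Prod.mk.injEq]; exact ⟨by omega, rfl⟩]
          exact hq
      · unfold pvKey pvCanon
        simp only
        rw [pvS1 px qx py qy hgt (by omega)]
        rw [show px + (qy - py) = qx by omega]
  · rcases lt_or_gt_of_ne (fun h : qx = px => hxne (by simp [h])) with hlt | hgt
    · -- qx < px, opposite diffs: (qx, py) is the lower-left corner
      refine ⟨(qx, py), (qx, qy), hmem _ hm1, hmem _ hq, ?_, ?_⟩
      · simp only [pvGoodB, Bool.and_eq_true, decide_eq_true_eq]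
        refine ⟨⟨by simp, by omega⟩, ?_, ?_⟩ <;> rw [hcont]
        · rw [show ((qx + (qy - py), py) : Int × Int) = (px, py) by
            rw [Prod.mk.injEq]; exact ⟨by omega, rfl⟩]
          exact hp
        · rw [show ((qx + (qy - py), qy) : Int × Int) = (px, qy) by
            rw [Prod.mk.injEq]; exact ⟨by omega, rfl⟩]
          exact hm2
      · unfold pvKey pvCanon
        simp only
        rw [pvS4 qx px py qy hlt (by omega)]
        rw [show qx + (qy - py) = px by omega]
    · -- px < qx, opposite diffs: (px, qy) is the lower-left corner
      refine ⟨(px, qy), (px, py), hmem _ hm2, hmem _ hp, ?_, ?_⟩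
      · simp only [pvGoodB, Bool.and_eq_true, decide_eq_true_eq]
        refine ⟨⟨by simp, by omega⟩, ?_, ?_⟩ <;> rw [hcont]
        · rw [show ((px + (py - qy), qy) : Int × Int) = (qx, qy) by
            rw [Prod.mk.injEq]; exact ⟨by omega, rfl⟩]
          exact hq
        · rw [show ((px + (py - qy), py) : Int × Int) = (qx, py) by
            rw [Prod.mk.injEq]; exact ⟨by omega, rfl⟩]
          exact hm1
      · unfold pvKey pvCanon
        simp only
        rw [pvS3 px qx qy py hgt (by omega)]
        rw [show px + (py - qy) = qx by omega]

-- backward geometry: the left side (a, b) of a present square is detected by A via the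
-- diagonal pair (a, upper-right corner), in either traversal order
lemma pvBackward {points : List (Int × Int)} {a b : Int × Int}
    (hb : b ∈ points) (hg : pvGoodB points a b = true) :
    pvCondB points a (a.1 + (b.2 - a.2), b.2) = true ∧
    pvCondB points (a.1 + (b.2 - a.2), b.2) a = true ∧
    pvKey a (a.1 + (b.2 - a.2), b.2) = pvCanon a b ∧
    pvKey (a.1 + (b.2 - a.2), b.2) a = pvCanon a b := by
  simp only [pvGoodB, Bool.and_eq_true, decide_eq_true_eq] at hg
  obtain ⟨⟨hb1, hy⟩, hm1, hm2⟩ := hg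
  have hbeq : b = (a.1, b.2) := by
    rw [← Prod.mk.eta (p := b), Prod.mk.injEq]
    exact ⟨hb1, rfl⟩
  have hcontb : PySem.Set.contains (PySem.Set.ofList points) (a.1, b.2) = true := by
    rw [PySem.Set.contains_iff, PySem.Set.mem_ofList, ← hbeq]
    exact hb
  refine ⟨?_, ?_, ?_, ?_⟩
  · simp only [pvCondB, Bool.and_eq_true, decide_eq_true_eq]
    refine ⟨⟨?_, by omega, by omega⟩, hm1, hcontb⟩
    rw [show a.1 + (b.2 - a.2) - a.1 = b.2 - a.2 by ring]
  · simp only [pvCondB, Bool.and_eq_true, decide_eq_true_eq]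
    refine ⟨⟨?_, by omega, by omega⟩, hcontb, hm1⟩
    rw [show a.1 - (a.1 + (b.2 - a.2)) = -(b.2 - a.2) by ring,
      show a.2 - b.2 = -(b.2 - a.2) by ring]
  · unfold pvKey pvCanon
    simp only
    conv_lhs => rw [← Prod.mk.eta (p := a)]
    conv_rhs => rw [← Prod.mk.eta (p := a), hbeq]
    exact pvS1 a.1 (a.1 + (b.2 - a.2)) a.2 b.2 (by omega) hy
  · unfold pvKey pvCanon
    simp only
    conv_lhs => rw [← Prod.mk.eta (p := a)]
    conv_rhs => rw [← Prod.mk.eta (p := a), hbeq]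
    exact pvS2 a.1 (a.1 + (b.2 - a.2)) a.2 b.2 (by omega) hy

lemma pvMem_keys (points : List (Int × Int)) (k : List (Int × Int)) :
    k ∈ pvKeys points ↔ ∃ z ∈ pvPairs points, k = pvCanon z.1 z.2 := by
  constructor
  · intro hk
    obtain ⟨z, hz, hsome⟩ := List.mem_filterMap.1 hk
    by_cases hc : pvCondB points z.1 z.2 = true
    · rw [if_pos hc] at hsome
      obtain ⟨hp, hq⟩ := pvMem_tailPairs hz
      obtain ⟨a, b, ha, hb, hg, hkey⟩ := pvForward hp hq hc
      refine ⟨(a, b), ?_, ?_⟩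
      · rw [pvPairs, List.mem_filter]
        exact ⟨List.mem_product.2 ⟨ha, hb⟩, hg⟩
      · rw [← Option.some_inj.1 hsome, hkey]
    · rw [if_neg hc] at hsome
      exact absurd hsome (by simp)
  · rintro ⟨⟨a, b⟩, hz, rfl⟩
    rw [pvPairs, List.mem_filter] at hz
    obtain ⟨hprod, hg⟩ := hz
    obtain ⟨ha, hb⟩ := List.mem_product.1 hprod
    have hpa : a ∈ points := (PySem.Set.mem_ofList _ _).1 ha
    have hpb : b ∈ points := (PySem.Set.mem_ofList _ _).1 hb
    obtain ⟨hc1, hc2, hk1, hk2⟩ := pvBackward (points := points) hpb hg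
    have hd : (0 : Int) < b.2 - a.2 := by
      simp only [pvGoodB, Bool.and_eq_true, decide_eq_true_eq] at hg
      omega
    have hq : ((a.1 + (b.2 - a.2), b.2) : Int × Int) ∈ points := by
      simp only [pvGoodB, Bool.and_eq_true, decide_eq_true_eq] at hg
      have := hg.2.2
      rw [PySem.Set.contains_iff, PySem.Set.mem_ofList] at this
      exact this
    have hne : a ≠ ((a.1 + (b.2 - a.2), b.2) : Int × Int) := by
      intro h
      have := congrArg Prod.fst h
      simp only at this
      omega
    rcases pvTailPairs_of_mem hpa hq hne with h | h
    · exact List.mem_filterMap.2 ⟨(a, (a.1 + (b.2 - a.2), b.2)), h, by rw [if_pos hc1, hk1]⟩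
    · exact List.mem_filterMap.2 ⟨((a.1 + (b.2 - a.2), b.2), a), h, by rw [if_pos hc2, hk2]⟩

lemma pvPairs_nodup (points : List (Int × Int)) : (pvPairs points).Nodup :=
  (List.Nodup.product (PySem.Set.nodup_ofList _) (PySem.Set.nodup_ofList _)).filter _

lemma pvCanon_inj : Function.Injective (fun z : (Int × Int) × (Int × Int) => pvCanon z.1 z.2) := by
  intro z w h
  simp only [pvCanon, List.cons.injEq, and_true] at h
  obtain ⟨h1, h2, -⟩ := h
  exact Prod.ext h1 h2

-- ===== VERDICT (by name: the statement is the Claim_ definition above) =====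
theorem countSquaresAvoidDuplication_spec : Claim_equal_countSquaresAvoidDuplication := by
  intro points _
  unfold Spec_countSquaresAvoidDuplication
  rw [pvA_eq, pvB_eq]
  congr 1
  have h1 : (pvKeys points).toFinset = ((pvPairs points).map (fun z => pvCanon z.1 z.2)).toFinset := by
    ext k
    simp only [List.mem_toFinset, List.mem_map, pvMem_keys]
    constructor
    · rintro ⟨z, hz, rfl⟩; exact ⟨z, hz, rfl⟩
    · rintro ⟨z, hz, rfl⟩; exact ⟨z, hz, rfl⟩
  have h2 : ((pvPairs points).map (fun z => pvCanon z.1 z.2)).Nodup :=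
    (pvPairs_nodup points).map pvCanon_inj
  rw [h1, List.toFinset_card_of_nodup h2, List.length_map]
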